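-- pv_equiv track=rewrite | github.com/sat-diff-analysis/differential-sat-encoding | SIMON/Simon_CNF_LF.py | diff_2Xors_CNF
-- ===== SOURCE A (Python) =====
-- def diff_2Xors_CNF(a, b, c, d, wordsize):
--
--     command = ""
--     for i in range(wordsize):
--         command += "ASSERT(((~{0}[{4}:{4}]) | ({1}[{4}:{4}]) | ({2}[{4}:{4}]) | ({3}[{4}:{4}])) = 0bin1);\n".format(a, b, c, d, i)
--         command += "ASSERT((({0}[{4}:{4}]) | (~{1}[{4}:{4}]) | ({2}[{4}:{4}]) | ({3}[{4}:{4}])) = 0bin1);\n".format(a, b, c, d, i)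
--         command += "ASSERT((({0}[{4}:{4}]) | ({1}[{4}:{4}]) | (~{2}[{4}:{4}]) | ({3}[{4}:{4}])) = 0bin1);\n".format(a, b, c, d, i)
--         command += "ASSERT((({0}[{4}:{4}]) | ({1}[{4}:{4}]) | ({2}[{4}:{4}]) | (~{3}[{4}:{4}])) = 0bin1);\n".format(a, b, c, d, i)
--         command += "ASSERT(((~{0}[{4}:{4}]) | (~{1}[{4}:{4}]) | (~{2}[{4}:{4}]) | ({3}[{4}:{4}])) = 0bin1);\n".format(a, b, c, d, i)
--         command += "ASSERT(((~{0}[{4}:{4}]) | (~{1}[{4}:{4}]) | ({2}[{4}:{4}]) | (~{3}[{4}:{4}])) = 0bin1);\n".format(a, b, c, d, i)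
--         command += "ASSERT(((~{0}[{4}:{4}]) | ({1}[{4}:{4}]) | (~{2}[{4}:{4}]) | (~{3}[{4}:{4}])) = 0bin1);\n".format(a, b, c, d, i)
--         command += "ASSERT((({0}[{4}:{4}]) | (~{1}[{4}:{4}]) | (~{2}[{4}:{4}]) | (~{3}[{4}:{4}])) = 0bin1);\n".format(a, b, c, d, i)
--     return command
-- ===== SOURCE B (Python) =====
-- _PATTERNS = [
--     (True, False, False, False),
--     (False, True, False, False),
--     (False, False, True, False),
--     (False, False, False, True),
--     (True, True, True, False),
--     (True, True, False, True),
--     (True, False, True, True),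
--     (False, True, True, True),
-- ]
--
--
-- def diff_2Xors_CNF(a, b, c, d, wordsize):
--     names = (a, b, c, d)
--     lines = []
--     for i in range(wordsize):
--         for pat in _PATTERNS:
--             lits = " | ".join(
--                 "(" + ("~" if neg else "") + name + "[" + str(i) + ":" + str(i) + "])"
--                 for neg, name in zip(pat, names))
--             lines.append("ASSERT((" + lits + ") = 0bin1);\n")
--     return "".join(lines)
-- ===== Notes on version B (the rewrite author's own statement) =====
-- stated objective: simpler
-- what changed: Replaces the eight hard-coded format-string concatenations per iteration with a data-driven table of eight negation patterns: each clause is assembled generically from per-literal pieces joined with ' | ' and the lines are collected in a list and joined once at the end.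
import Mathlib
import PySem

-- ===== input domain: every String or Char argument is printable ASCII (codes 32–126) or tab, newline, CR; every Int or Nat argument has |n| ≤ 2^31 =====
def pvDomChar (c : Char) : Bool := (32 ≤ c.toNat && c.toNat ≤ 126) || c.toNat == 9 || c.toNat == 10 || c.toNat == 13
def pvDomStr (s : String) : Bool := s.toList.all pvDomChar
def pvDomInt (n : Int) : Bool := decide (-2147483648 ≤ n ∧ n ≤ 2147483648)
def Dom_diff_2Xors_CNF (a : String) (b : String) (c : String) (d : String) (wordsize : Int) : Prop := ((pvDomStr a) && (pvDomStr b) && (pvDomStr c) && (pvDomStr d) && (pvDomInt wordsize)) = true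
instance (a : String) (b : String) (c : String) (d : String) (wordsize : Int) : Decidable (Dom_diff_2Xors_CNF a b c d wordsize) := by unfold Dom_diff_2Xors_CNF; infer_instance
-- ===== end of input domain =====

-- B replaces A's eight hard-coded format strings per iteration by a table of eight
-- negation patterns, assembling each clause from per-literal pieces (objective: simpler).

-- ===== PORT A =====
-- "X[{i}:{i}]" piece shared by every literal of A's format strings (exact: str(i) is PySem.Int.toChars)
def pvIdxA (x : List Char) (i : Int) : List Char :=
  x ++ "[".toList ++ PySem.Int.toChars i ++ ":".toList ++ PySem.Int.toChars i ++ "]".toList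

-- the eight format-string lines of A, transliterated one by one
def pvLineA1 (a b c d : List Char) (i : Int) : List Char :=
  "ASSERT(((~".toList ++ pvIdxA a i ++ ") | (".toList ++ pvIdxA b i ++ ") | (".toList ++ pvIdxA c i ++ ") | (".toList ++ pvIdxA d i ++ ")) = 0bin1);\n".toList
def pvLineA2 (a b c d : List Char) (i : Int) : List Char :=
  "ASSERT(((".toList ++ pvIdxA a i ++ ") | (~".toList ++ pvIdxA b i ++ ") | (".toList ++ pvIdxA c i ++ ") | (".toList ++ pvIdxA d i ++ ")) = 0bin1);\n".toList
def pvLineA3 (a b c d : List Char) (i : Int) : List Char :=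
  "ASSERT(((".toList ++ pvIdxA a i ++ ") | (".toList ++ pvIdxA b i ++ ") | (~".toList ++ pvIdxA c i ++ ") | (".toList ++ pvIdxA d i ++ ")) = 0bin1);\n".toList
def pvLineA4 (a b c d : List Char) (i : Int) : List Char :=
  "ASSERT(((".toList ++ pvIdxA a i ++ ") | (".toList ++ pvIdxA b i ++ ") | (".toList ++ pvIdxA c i ++ ") | (~".toList ++ pvIdxA d i ++ ")) = 0bin1);\n".toList
def pvLineA5 (a b c d : List Char) (i : Int) : List Char :=
  "ASSERT(((~".toList ++ pvIdxA a i ++ ") | (~".toList ++ pvIdxA b i ++ ") | (~".toList ++ pvIdxA c i ++ ") | (".toList ++ pvIdxA d i ++ ")) = 0bin1);\n".toList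
def pvLineA6 (a b c d : List Char) (i : Int) : List Char :=
  "ASSERT(((~".toList ++ pvIdxA a i ++ ") | (~".toList ++ pvIdxA b i ++ ") | (".toList ++ pvIdxA c i ++ ") | (~".toList ++ pvIdxA d i ++ ")) = 0bin1);\n".toList
def pvLineA7 (a b c d : List Char) (i : Int) : List Char :=
  "ASSERT(((~".toList ++ pvIdxA a i ++ ") | (".toList ++ pvIdxA b i ++ ") | (~".toList ++ pvIdxA c i ++ ") | (~".toList ++ pvIdxA d i ++ ")) = 0bin1);\n".toList
def pvLineA8 (a b c d : List Char) (i : Int) : List Char :=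
  "ASSERT(((".toList ++ pvIdxA a i ++ ") | (~".toList ++ pvIdxA b i ++ ") | (~".toList ++ pvIdxA c i ++ ") | (~".toList ++ pvIdxA d i ++ ")) = 0bin1);\n".toList

def diff_2Xors_CNF (a : String) (b : String) (c : String) (d : String) (wordsize : Int) : String :=
  String.ofList <|
    (PySem.List.pyRange 0 wordsize 1).foldl (fun command i =>
      command ++ pvLineA1 a.toList b.toList c.toList d.toList i
              ++ pvLineA2 a.toList b.toList c.toList d.toList i
              ++ pvLineA3 a.toList b.toList c.toList d.toList i
              ++ pvLineA4 a.toList b.toList c.toList d.toList i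
              ++ pvLineA5 a.toList b.toList c.toList d.toList i
              ++ pvLineA6 a.toList b.toList c.toList d.toList i
              ++ pvLineA7 a.toList b.toList c.toList d.toList i
              ++ pvLineA8 a.toList b.toList c.toList d.toList i) []

-- ===== PORT B =====
-- the eight sign patterns, in A's emission order
def pvPatterns : List (Bool × Bool × Bool × Bool) :=
  [(true, false, false, false), (false, true, false, false),
   (false, false, true, false), (false, false, false, true),
   (true, true, true, false), (true, true, false, true),
   (true, false, true, true), (false, true, true, true)]

-- "(" + ("~" if neg else "") + name + "[" + str(i) + ":" + str(i) + "])"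
def pvLitB (neg : Bool) (name : List Char) (i : Int) : List Char :=
  "(".toList ++ (if neg then "~".toList else []) ++ name ++ "[".toList
    ++ PySem.Int.toChars i ++ ":".toList ++ PySem.Int.toChars i ++ "])".toList

def pvLineB (a b c d : List Char) (i : Int) (pat : Bool × Bool × Bool × Bool) : List Char :=
  "ASSERT((".toList
    ++ List.intercalate " | ".toList
         [pvLitB pat.1 a i, pvLitB pat.2.1 b i, pvLitB pat.2.2.1 c i, pvLitB pat.2.2.2 d i]
    ++ ") = 0bin1);\n".toList

def diff_2Xors_CNF_alt (a : String) (b : String) (c : String) (d : String) (wordsize : Int) : String :=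
  String.ofList <|
    ((PySem.List.pyRange 0 wordsize 1).flatMap (fun i =>
      pvPatterns.map (pvLineB a.toList b.toList c.toList d.toList i))).flatten

-- ===== PRECONDITION & SPEC =====
def Spec_diff_2Xors_CNF (a : String) (b : String) (c : String) (d : String) (wordsize : Int) (out : String) : Prop := out = diff_2Xors_CNF_alt a b c d wordsize
instance (a : String) (b : String) (c : String) (d : String) (wordsize : Int) (out : String) : Decidable (Spec_diff_2Xors_CNF a b c d wordsize out) := by unfold Spec_diff_2Xors_CNF; infer_instance

-- ===== CLAIM (what is proved, stated in full; the proofs are below) =====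
def Claim_equal_diff_2Xors_CNF : Prop := ∀ (a : String) (b : String) (c : String) (d : String) (wordsize : Int), Dom_diff_2Xors_CNF a b c d wordsize → Spec_diff_2Xors_CNF a b c d wordsize (diff_2Xors_CNF a b c d wordsize)

-- ===== LEMMAS AND PROOFS =====
set_option maxRecDepth 8192 in
theorem pvLine_eq1 (a b c d : List Char) (i : Int) :
    pvLineB a b c d i (true, false, false, false) = pvLineA1 a b c d i := by
  simp [pvLineA1, pvIdxA, pvLineB, pvLitB, List.intercalate, List.intersperse]

set_option maxRecDepth 8192 in
theorem pvLine_eq2 (a b c d : List Char) (i : Int) :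
    pvLineB a b c d i (false, true, false, false) = pvLineA2 a b c d i := by
  simp [pvLineA2, pvIdxA, pvLineB, pvLitB, List.intercalate, List.intersperse]

set_option maxRecDepth 8192 in
theorem pvLine_eq3 (a b c d : List Char) (i : Int) :
    pvLineB a b c d i (false, false, true, false) = pvLineA3 a b c d i := by
  simp [pvLineA3, pvIdxA, pvLineB, pvLitB, List.intercalate, List.intersperse]

set_option maxRecDepth 8192 in
theorem pvLine_eq4 (a b c d : List Char) (i : Int) :
    pvLineB a b c d i (false, false, false, true) = pvLineA4 a b c d i := by
  simp [pvLineA4, pvIdxA, pvLineB, pvLitB, List.intercalate, List.intersperse]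

set_option maxRecDepth 8192 in
theorem pvLine_eq5 (a b c d : List Char) (i : Int) :
    pvLineB a b c d i (true, true, true, false) = pvLineA5 a b c d i := by
  simp [pvLineA5, pvIdxA, pvLineB, pvLitB, List.intercalate, List.intersperse]

set_option maxRecDepth 8192 in
theorem pvLine_eq6 (a b c d : List Char) (i : Int) :
    pvLineB a b c d i (true, true, false, true) = pvLineA6 a b c d i := by
  simp [pvLineA6, pvIdxA, pvLineB, pvLitB, List.intercalate, List.intersperse]

set_option maxRecDepth 8192 in
theorem pvLine_eq7 (a b c d : List Char) (i : Int) :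
    pvLineB a b c d i (true, false, true, true) = pvLineA7 a b c d i := by
  simp [pvLineA7, pvIdxA, pvLineB, pvLitB, List.intercalate, List.intersperse]

set_option maxRecDepth 8192 in
theorem pvLine_eq8 (a b c d : List Char) (i : Int) :
    pvLineB a b c d i (false, true, true, true) = pvLineA8 a b c d i := by
  simp [pvLineA8, pvIdxA, pvLineB, pvLitB, List.intercalate, List.intersperse]

-- one iteration of A equals the eight B-lines of that iteration, concatenated
theorem pvBlock_eq (a b c d : List Char) (i : Int) :
    pvLineA1 a b c d i ++ pvLineA2 a b c d i ++ pvLineA3 a b c d i ++ pvLineA4 a b c d i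
      ++ pvLineA5 a b c d i ++ pvLineA6 a b c d i ++ pvLineA7 a b c d i ++ pvLineA8 a b c d i
    = (pvPatterns.map (pvLineB a b c d i)).flatten := by
  simp [pvPatterns, pvLine_eq1, pvLine_eq2, pvLine_eq3, pvLine_eq4,
        pvLine_eq5, pvLine_eq6, pvLine_eq7, pvLine_eq8]

theorem pvFold_eq (a b c d : List Char) (l : List Int) (acc : List Char) :
    l.foldl (fun command i =>
      command ++ pvLineA1 a b c d i ++ pvLineA2 a b c d i ++ pvLineA3 a b c d i
              ++ pvLineA4 a b c d i ++ pvLineA5 a b c d i ++ pvLineA6 a b c d i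
              ++ pvLineA7 a b c d i ++ pvLineA8 a b c d i) acc
    = acc ++ (l.flatMap (fun i => pvPatterns.map (pvLineB a b c d i))).flatten := by
  induction l generalizing acc with
  | nil => simp
  | cons x xs ih =>
      simp only [List.foldl_cons, List.flatMap_cons, List.flatten_append, ih]
      rw [← pvBlock_eq]
      simp

-- ===== VERDICT (by name: the statement is the Claim_ definition above) =====
theorem diff_2Xors_CNF_spec : Claim_equal_diff_2Xors_CNF := by
  intro a b c d wordsize _
  show _ = _
  unfold diff_2Xors_CNF diff_2Xors_CNF_alt
  rw [pvFold_eq]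
  simp
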